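-- pv_equiv track=rewrite | github.com/JoaoMarcelo2207/POC_jetson_media_pipe | not_using_content/lib/automatic_labeler_functions.py | find_all_matches
-- ===== SOURCE A (Python) =====
-- def find_close_values(idxs, threshold):
--     close_values = []
--
--     # Compare each pair of lists
--     for i in range(len(idxs)):
--         for j in range(i+1, len(idxs)):
--             list1 = idxs[i]
--             list2 = idxs[j]
--
--             # Compare every element of both lists
--             for num1 in list1:
--                 for num2 in list2:
--
--                     # If the distance between the values are smaller than the threshold, consider it accepted.
--                     if abs(num1 - num2) <= threshold:
--                         close_values.append(min(num1,num2))
--     close_values = set(close_values)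
--     return close_values
--
-- def find_all_matches(list_of_index, threshold):
--     n = len(list_of_index)
--     list_aux = []
--
--     if n <= 1:
--         return list_of_index
--     else:
--         # Select the first and second one on the similarity search
--         list_aux.append(list_of_index.pop(0))
--         list_aux.append(list_of_index.pop(0))
--
--         result = find_close_values(list_aux, threshold)
--         list_of_index.insert(0, result)
--
--         return find_all_matches(list_of_index, threshold)
-- ===== SOURCE B (Python) =====
-- def find_all_matches(list_of_index, threshold):
--     if len(list_of_index) <= 1:
--         return list_of_index
--
--     def merge(l1, l2):
--         out = set()
--         for x in l1:
--             for y in l2: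
--                 if abs(x - y) <= threshold:
--                     out.add(min(x, y))
--         return out
--
--     acc = merge(list_of_index[0], list_of_index[1])
--     for nxt in list_of_index[2:]:
--         acc = merge(acc, nxt)
--     return [acc]
-- ===== Notes on version B (the rewrite author's own statement) =====
-- stated objective: simpler
-- what changed: Replaces A's recursion with pop(0)/insert(0) mutation and the generic all-pairs helper over an aux list by a plain non-mutating left fold with a direct two-list merge that adds elements to the set incrementally instead of building a list and converting it at the end.
import Mathlib
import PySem

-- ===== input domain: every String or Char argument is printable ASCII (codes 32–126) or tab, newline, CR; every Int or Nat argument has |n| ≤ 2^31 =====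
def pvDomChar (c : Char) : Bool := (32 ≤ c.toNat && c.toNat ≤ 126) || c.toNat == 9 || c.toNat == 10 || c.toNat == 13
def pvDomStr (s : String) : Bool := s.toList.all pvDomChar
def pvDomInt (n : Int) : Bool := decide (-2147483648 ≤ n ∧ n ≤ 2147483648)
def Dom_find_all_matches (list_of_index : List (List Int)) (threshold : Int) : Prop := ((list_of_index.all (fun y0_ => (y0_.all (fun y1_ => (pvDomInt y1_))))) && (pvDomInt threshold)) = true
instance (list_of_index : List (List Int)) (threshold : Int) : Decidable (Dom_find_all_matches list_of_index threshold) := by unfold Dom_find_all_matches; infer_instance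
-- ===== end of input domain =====

-- B replaces A's recursion with pop(0)/insert(0) mutation and generic all-pairs helper by a
-- non-mutating left fold with a direct two-list merge and incremental set insertion (objective:
-- simpler). NOTE: Python A mutates its list argument (pop/insert); the equivalence proved here is
-- about the RETURN value only. Python set iteration/order is unspecified; both ports represent the
-- returned set as its first-insertion-order element list (PySem.Set).


-- ===== PORT A =====
-- literal port of find_close_values: double index loop over range(len)/range(i+1,len),
-- inner double element loop appending min(num1,num2), then set() of the collected list
def find_close_values (idxs : List (List Int)) (threshold : Int) : List Int :=
  let close_values : List Int := []
  let close_values :=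
    (PySem.List.pyRange 0 (idxs.length : Int) 1).foldl (fun cv i =>
      (PySem.List.pyRange (i + 1) (idxs.length : Int) 1).foldl (fun cv j =>
        let list1 := PySem.List.pyGetD idxs i []
        let list2 := PySem.List.pyGetD idxs j []
        list1.foldl (fun cv num1 =>
          list2.foldl (fun cv num2 =>
            if |num1 - num2| ≤ threshold then cv ++ [min num1 num2] else cv) cv) cv) cv) close_values
  PySem.Set.ofList close_values

-- pop(0) twice into list_aux, merge, insert(0) the result, recurse; n ≤ 1 returns the list as is
def find_all_matches (list_of_index : List (List Int)) (threshold : Int) : List (List Int) :=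
  if list_of_index.length ≤ 1 then list_of_index
  else
    match list_of_index with
    | a :: b :: rest => find_all_matches (find_close_values [a, b] threshold :: rest) threshold
    | other => other   -- unreachable: length ≥ 2
termination_by list_of_index.length
decreasing_by simp

-- ===== PORT B =====
-- Source B's merge: incremental set, scanning l1 then l2
def pvMerge (threshold : Int) (l1 l2 : List Int) : List Int :=
  l1.foldl (fun out x =>
    l2.foldl (fun out y =>
      if |x - y| ≤ threshold then PySem.Set.add out (min x y) else out) out) []

def find_all_matches_alt (list_of_index : List (List Int)) (threshold : Int) : List (List Int) :=
  if list_of_index.length ≤ 1 then list_of_index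
  else
    let acc := pvMerge threshold (PySem.List.pyGetD list_of_index 0 [])
                 (PySem.List.pyGetD list_of_index 1 [])
    let acc := (PySem.List.slice list_of_index (some 2) none).foldl
                 (fun acc nxt => pvMerge threshold acc nxt) acc
    [acc]

-- ===== PRECONDITION & SPEC =====
def Spec_find_all_matches (list_of_index : List (List Int)) (threshold : Int) (out : List (List Int)) : Prop := out = find_all_matches_alt list_of_index threshold
instance (list_of_index : List (List Int)) (threshold : Int) (out : List (List Int)) : Decidable (Spec_find_all_matches list_of_index threshold out) := by unfold Spec_find_all_matches; infer_instance

-- ===== CLAIM (what is proved, stated in full; the proofs are below) =====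
def Claim_equal_find_all_matches : Prop := ∀ (list_of_index : List (List Int)) (threshold : Int), Dom_find_all_matches list_of_index threshold → Spec_find_all_matches list_of_index threshold (find_all_matches list_of_index threshold)

-- ===== LEMMAS AND PROOFS =====

-- streaming the inner append loop through Set.ofList
lemma ofList_inner (threshold x : Int) (l2 : List Int) (cv : List Int) :
    PySem.Set.ofList (l2.foldl (fun cv num2 =>
        if |x - num2| ≤ threshold then cv ++ [min x num2] else cv) cv)
      = l2.foldl (fun out y =>
        if |x - y| ≤ threshold then PySem.Set.add out (min x y) else out) (PySem.Set.ofList cv) := by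
  induction l2 generalizing cv with
  | nil => rfl
  | cons y t ih =>
      simp only [List.foldl_cons]
      by_cases h : |x - y| ≤ threshold
      · rw [if_pos h, if_pos h, ih, PySem.Set.ofList_append_singleton]
      · rw [if_neg h, if_neg h, ih]

lemma ofList_outer (threshold : Int) (l1 l2 : List Int) (cv : List Int) :
    PySem.Set.ofList (l1.foldl (fun cv num1 =>
        l2.foldl (fun cv num2 =>
          if |num1 - num2| ≤ threshold then cv ++ [min num1 num2] else cv) cv) cv)
      = l1.foldl (fun out x =>
        l2.foldl (fun out y =>
          if |x - y| ≤ threshold then PySem.Set.add out (min x y) else out) out)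
        (PySem.Set.ofList cv) := by
  induction l1 generalizing cv with
  | nil => rfl
  | cons x t ih => simp only [List.foldl_cons, ih, ofList_inner]

-- A's generic pairwise helper on a 2-element aux list IS B's direct two-list merge
lemma fcv_eq_merge (l1 l2 : List Int) (threshold : Int) :
    find_close_values [l1, l2] threshold = pvMerge threshold l1 l2 := by
  have h2 : PySem.List.pyRange 0 ((2 : Nat) : Int) 1 = [0, 1] := by decide
  have h1 : PySem.List.pyRange (0 + 1) ((2 : Nat) : Int) 1 = [1] := by decide
  have h0 : PySem.List.pyRange (1 + 1) ((2 : Nat) : Int) 1 = [] := by decide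
  simp only [find_close_values, List.length_cons, List.length_nil]
  rw [show ((0 + 1 + 1 : Nat) : Int) = ((2 : Nat) : Int) by norm_num] at *
  rw [h2]
  simp only [List.foldl_cons, List.foldl_nil, h1, h0]
  simp only [show PySem.List.pyGetD [l1, l2] (0 : Int) [] = l1 from rfl,
             show PySem.List.pyGetD [l1, l2] (1 : Int) [] = l2 from rfl]
  exact ofList_outer threshold l1 l2 []

lemma fam_go (threshold : Int) :
    ∀ (rest : List (List Int)) (a b : List Int),
      find_all_matches (a :: b :: rest) threshold
        = [rest.foldl (fun acc nxt => pvMerge threshold acc nxt) (pvMerge threshold a b)] := by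
  intro rest
  induction rest with
  | nil =>
      intro a b
      rw [find_all_matches]
      simp [find_all_matches, fcv_eq_merge]
  | cons c t ih =>
      intro a b
      rw [find_all_matches]
      simp only [List.length_cons, fcv_eq_merge]
      rw [if_neg (by omega), ih]
      simp

-- ===== VERDICT (by name: the statement is the Claim_ definition above) =====
theorem find_all_matches_spec : Claim_equal_find_all_matches := by
  intro l threshold _
  unfold Spec_find_all_matches
  match l with
  | [] => simp [find_all_matches, find_all_matches_alt]
  | [a] => simp [find_all_matches, find_all_matches_alt]
  | a :: b :: rest =>
      rw [fam_go threshold rest a b]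
      have hs : PySem.List.slice (a :: b :: rest) (some ((2 : Nat) : Int)) none = rest := by
        rw [PySem.List.slice_from_natCast]
        rfl
      simp only [find_all_matches_alt, List.length_cons]
      rw [if_neg (by omega)]
      simp only [show ((2 : Int)) = ((2 : Nat) : Int) from rfl, hs]
      simp [pysem]
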